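-- pv_equiv track=rewrite | github.com/Franciscocpierna/python_rpa_projetos | tk_relogio_mundial/relogio_mundial.py | traduzir_data
-- ===== SOURCE A (Python) =====
-- def traduzir_data(data):
--
--     # Descrição do propósito do método. Este comentário explica que o
--             # método modifica a string de data para substituir nomes
--             # em inglês por equivalentes em português.
--     """Traduz o dia da semana e o mês para português."""
--
--     # Dicionário contendo as traduções dos dias da semana e dos
--             # meses do ano do inglês para o português.
--     # As chaves do dicionário são os termos em inglês e os valores
--             # são os equivalentes em português.
--     traducoes = {
--         'Monday': 'Segunda-feira',
--         'Tuesday': 'Terça-feira',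
--         'Wednesday': 'Quarta-feira',
--         'Thursday': 'Quinta-feira',
--         'Friday': 'Sexta-feira',
--         'Saturday': 'Sábado',
--         'Sunday': 'Domingo',
--         'January': 'Janeiro',
--         'February': 'Fevereiro',
--         'March': 'Março',
--         'April': 'Abril',
--         'May': 'Maio',
--         'June': 'Junho',
--         'July': 'Julho',
--         'August': 'Agosto',
--         'September': 'Setembro',
--         'October': 'Outubro',
--         'November': 'Novembro',
--         'December': 'Dezembro'
--     }
--
--     # Laço de repetição que percorre cada par de chave-valor no
--             # dicionário 'traducoes'.
--     # 'ingles' representa a chave (termo em inglês) e 'portugues'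
--             # representa o valor (termo em português).
--     for ingles, portugues in traducoes.items():
--
--         # O método 'replace' é chamado sobre a string 'data'.
--         # Ele substitui todas as ocorrências do termo em inglês (chave)
--                 # pelo termo em português (valor) dentro da string.
--         data = data.replace(ingles, portugues)
--
--     # O método retorna a string 'data' após todas as substituições
--             # terem sido feitas.
--     return data
-- ===== SOURCE B (Python) =====
-- def traduzir_data(data):
--     """Traduz o dia da semana e o mes para portugues em uma unica passada."""
--     traducoes = {
--         'Monday': 'Segunda-feira',
--         'Tuesday': 'Terça-feira',
--         'Wednesday': 'Quarta-feira',
--         'Thursday': 'Quinta-feira',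
--         'Friday': 'Sexta-feira',
--         'Saturday': 'Sábado',
--         'Sunday': 'Domingo',
--         'January': 'Janeiro',
--         'February': 'Fevereiro',
--         'March': 'Março',
--         'April': 'Abril',
--         'May': 'Maio',
--         'June': 'Junho',
--         'July': 'Julho',
--         'August': 'Agosto',
--         'September': 'Setembro',
--         'October': 'Outubro',
--         'November': 'Novembro',
--         'December': 'Dezembro'
--     }
--     # single left-to-right scan: at each position, emit the translation of the
--     # first dictionary key that starts here, otherwise copy one character
--     out = []
--     i = 0
--     n = len(data)
--     while i < n:
--         for ingles, portugues in traducoes.items():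
--             if data.startswith(ingles, i):
--                 out.append(portugues)
--                 i += len(ingles)
--                 break
--         else:
--             out.append(data[i])
--             i += 1
--     return ''.join(out)
-- ===== Notes on version B (the rewrite author's own statement) =====
-- stated objective: alternative
-- what changed: Replaces A's 19 sequential full-string str.replace passes with a single left-to-right scan that, at each position, substitutes the first dictionary key starting there (equivalent because key occurrences cannot overlap and no Portuguese value can create or hide an English key).
import Mathlib
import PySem

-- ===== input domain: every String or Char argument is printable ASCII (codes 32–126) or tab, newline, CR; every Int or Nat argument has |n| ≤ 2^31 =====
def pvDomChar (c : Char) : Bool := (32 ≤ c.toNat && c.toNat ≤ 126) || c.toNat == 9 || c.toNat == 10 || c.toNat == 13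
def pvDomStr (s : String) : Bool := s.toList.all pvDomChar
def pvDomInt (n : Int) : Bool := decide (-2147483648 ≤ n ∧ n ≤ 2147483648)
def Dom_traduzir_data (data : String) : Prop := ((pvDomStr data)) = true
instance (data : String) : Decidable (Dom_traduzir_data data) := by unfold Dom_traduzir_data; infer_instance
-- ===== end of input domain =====

-- B replaces A's 19 sequential full-string replace passes with one left-to-right scan
-- dispatching through the same translation table (alternative decomposition, same cost).

-- ===== PORT A =====
-- the dict literal 'traducoes' (insertion order), as an association list
def traducoes : List (String × String) :=
  [("Monday", "Segunda-feira"), ("Tuesday", "Terça-feira"), ("Wednesday", "Quarta-feira"),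
   ("Thursday", "Quinta-feira"), ("Friday", "Sexta-feira"), ("Saturday", "Sábado"),
   ("Sunday", "Domingo"), ("January", "Janeiro"), ("February", "Fevereiro"),
   ("March", "Março"), ("April", "Abril"), ("May", "Maio"), ("June", "Junho"),
   ("July", "Julho"), ("August", "Agosto"), ("September", "Setembro"),
   ("October", "Outubro"), ("November", "Novembro"), ("December", "Dezembro")]

-- the for-loop: data = data.replace(ingles, portugues) over traducoes.items()
def traduzir_data (data : String) : String :=
  traducoes.foldl (fun d p => PySem.Str.replace d p.1 p.2) data

-- ===== PORT B =====
-- B's dict, on code points (same contents as in Source B)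
def traducoesAlt : List (List Char × List Char) :=
  [("Monday".toList, "Segunda-feira".toList), ("Tuesday".toList, "Terça-feira".toList),
   ("Wednesday".toList, "Quarta-feira".toList), ("Thursday".toList, "Quinta-feira".toList),
   ("Friday".toList, "Sexta-feira".toList), ("Saturday".toList, "Sábado".toList),
   ("Sunday".toList, "Domingo".toList), ("January".toList, "Janeiro".toList),
   ("February".toList, "Fevereiro".toList), ("March".toList, "Março".toList),
   ("April".toList, "Abril".toList), ("May".toList, "Maio".toList),
   ("June".toList, "Junho".toList), ("July".toList, "Julho".toList),
   ("August".toList, "Agosto".toList), ("September".toList, "Setembro".toList),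
   ("October".toList, "Outubro".toList), ("November".toList, "Novembro".toList),
   ("December".toList, "Dezembro".toList)]

-- Source B's while-loop: at each position the inner for-with-break finds the FIRST key that
-- starts here (find?), emits its value and skips it; otherwise copies one character
def scanTrad (ps : List (List Char × List Char)) : List Char → List Char
  | [] => []
  | c :: t =>
    match ps.find? (fun p => p.1.isPrefixOf (c :: t)) with
    | some p => p.2 ++ scanTrad ps (t.drop (p.1.length - 1))
    | none => c :: scanTrad ps t
termination_by l => l.length
decreasing_by
  · simp only [List.length_drop, List.length_cons]; omega
  · simp only [List.length_cons]; omega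

def traduzir_data_alt (data : String) : String :=
  String.ofList (scanTrad traducoesAlt data.toList)

-- ===== PRECONDITION & SPEC =====
def Spec_traduzir_data (data : String) (out : String) : Prop := out = traduzir_data_alt data
instance (data : String) (out : String) : Decidable (Spec_traduzir_data data out) := by unfold Spec_traduzir_data; infer_instance

-- ===== CLAIM (what is proved, stated in full; the proofs are below) =====
def Claim_equal_traduzir_data : Prop := ∀ (data : String), Dom_traduzir_data data → Spec_traduzir_data data (traduzir_data data)

-- ===== LEMMAS AND PROOFS =====

-- clean recursive form of Python's str.replace (old nonempty)
def rep (old new : List Char) : List Char → List Char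
  | [] => []
  | c :: t =>
    if old.isPrefixOf (c :: t) then new ++ rep old new (t.drop (old.length - 1))
    else c :: rep old new t
termination_by l => l.length
decreasing_by
  · simp only [List.length_drop, List.length_cons]; omega
  · simp only [List.length_cons]; omega

def isLowC (c : Char) : Bool := 'a' ≤ c && c ≤ 'z'

-- rep with needle 'old' walks straight over a block 'u' when no occurrence of 'old'
-- can start inside 'u' (whatever follows)
abbrev SplitSafe (old u : List Char) : Prop :=
  ∀ i, i < u.length → ¬ old <+: u.drop i ∧ ¬ u.drop i <+: old

theorem prefix_append_cases {w u x : List Char} (h : w <+: u ++ x) : w <+: u ∨ u <+: w := by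
  rcases le_total w.length u.length with hle | hle
  · exact Or.inl (List.prefix_of_prefix_length_le h (List.prefix_append u x) hle)
  · exact Or.inr (List.prefix_of_prefix_length_le (List.prefix_append u x) h hle)

theorem rep_nil (old new : List Char) : rep old new [] = [] := by simp [rep]

theorem rep_cons_pos {old : List Char} (new : List Char) {c : Char} {t : List Char}
    (h : old <+: c :: t) :
    rep old new (c :: t) = new ++ rep old new (t.drop (old.length - 1)) := by
  rw [rep]; simp [List.isPrefixOf_iff_prefix, h]

theorem rep_cons_neg {old : List Char} (new : List Char) {c : Char} {t : List Char}
    (h : ¬ old <+: c :: t) :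
    rep old new (c :: t) = c :: rep old new t := by
  rw [rep]; simp [List.isPrefixOf_iff_prefix, h]

theorem rep_head {old : List Char} (new : List Char) (hold : old ≠ []) (x : List Char) :
    rep old new (old ++ x) = new ++ rep old new x := by
  cases old with
  | nil => exact absurd rfl hold
  | cons d o' =>
    have h : (d :: o') <+: d :: (o' ++ x) := by simp
    calc rep (d :: o') new ((d :: o') ++ x)
        = new ++ rep (d :: o') new ((o' ++ x).drop ((d :: o').length - 1)) := rep_cons_pos new h
      _ = new ++ rep (d :: o') new x := by simp

theorem rep_append {old new u : List Char} (h : SplitSafe old u) (x : List Char) :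
    rep old new (u ++ x) = u ++ rep old new x := by
  induction u with
  | nil => simp
  | cons c u' ih =>
    have h0 := h 0 (by simp)
    simp only [List.drop_zero] at h0
    have hnp : ¬ old <+: (c :: u') ++ x := fun hp =>
      (prefix_append_cases hp).elim h0.1 h0.2
    have h' : SplitSafe old u' := by
      intro i hi
      have := h (i + 1) (by simp; omega)
      simpa [List.drop_succ_cons] using this
    calc rep old new ((c :: u') ++ x)
        = c :: rep old new (u' ++ x) := rep_cons_neg new hnp
      _ = c :: (u' ++ rep old new x) := by rw [ih h']
      _ = (c :: u') ++ rep old new x := rfl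

-- an all-lowercase word is a prefix of rep's output only where it was a prefix of the input
theorem lower_prefix {old new : List Char} (hnewne : new ≠ [])
    (hnew : ∀ c ∈ new.take 1, isLowC c = false) :
    ∀ t w, (∀ c ∈ w, isLowC c = true) → w <+: rep old new t → w <+: t := by
  intro t
  induction t using rep.induct (old := old) with
  | case1 =>
    intro w _ hw
    simpa [rep_nil] using hw
  | case2 c t hpre ih =>
    intro w hlow hw
    rw [rep_cons_pos new (List.isPrefixOf_iff_prefix.mp hpre)] at hw
    match w with
    | [] => exact List.nil_prefix
    | d :: w' =>
      cases hn : new with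
      | nil => exact absurd hn hnewne
      | cons n0 ns =>
        subst hn
        have hd : d = n0 := (List.cons_prefix_cons.mp (by simpa using hw)).1
        have h1 : isLowC d = true := hlow d (by simp)
        have h2 : isLowC n0 = false := hnew n0 (by simp)
        rw [hd] at h1; rw [h1] at h2; exact absurd h2 (by simp)
  | case3 c t hpre ih =>
    intro w hlow hw
    rw [rep_cons_neg new (fun h => hpre (List.isPrefixOf_iff_prefix.mpr h))] at hw
    match w with
    | [] => exact List.nil_prefix
    | d :: w' =>
      obtain ⟨hd, hw'⟩ := List.cons_prefix_cons.mp hw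
      exact List.cons_prefix_cons.mpr ⟨hd, ih w' (fun c hc => hlow c (by simp [hc])) hw'⟩

-- A's pipeline on code points
def pipeA (ps : List (List Char × List Char)) (l : List Char) : List Char :=
  ps.foldl (fun s p => rep p.1 p.2 s) l

theorem pipeA_nil (ps : List (List Char × List Char)) : pipeA ps [] = [] := by
  induction ps with
  | nil => rfl
  | cons p ps ih => simpa [pipeA, rep_nil] using ih

theorem pipeA_append {ps : List (List Char × List Char)} {u : List Char}
    (h : ∀ q ∈ ps, SplitSafe q.1 u) (x : List Char) :
    pipeA ps (u ++ x) = u ++ pipeA ps x := by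
  induction ps generalizing x with
  | nil => rfl
  | cons q ps ih =>
    calc pipeA (q :: ps) (u ++ x)
        = pipeA ps (rep q.1 q.2 (u ++ x)) := rfl
      _ = pipeA ps (u ++ rep q.1 q.2 x) := by rw [rep_append (h q (by simp))]
      _ = u ++ pipeA ps (rep q.1 q.2 x) := ih (fun q' hq' => h q' (by simp [hq'])) _
      _ = u ++ pipeA (q :: ps) x := rfl

-- a head position matched by no key stays unmatched through the whole pipeline
theorem pipeA_cons {ps : List (List Char × List Char)}
    (hk : ∀ p ∈ ps, p.1 ≠ [])
    (hlow : ∀ p ∈ ps, ∀ c ∈ p.1.tail, isLowC c = true)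
    (hvne : ∀ p ∈ ps, p.2 ≠ [])
    (hvup : ∀ p ∈ ps, ∀ c ∈ p.2.take 1, isLowC c = false)
    (c : Char) :
    ∀ t, (∀ p ∈ ps, ¬ p.1 <+: c :: t) → pipeA ps (c :: t) = c :: pipeA ps t := by
  induction ps with
  | nil => intro t _; rfl
  | cons q ps ih =>
    intro t hnp
    have hq : ¬ q.1 <+: c :: t := hnp q (by simp)
    have hrest : ∀ p ∈ ps, ¬ p.1 <+: c :: rep q.1 q.2 t := by
      intro p hp hpre
      match hp1 : p.1, hk p (by simp [hp]) with
      | d :: w, _ =>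
        rw [hp1] at hpre
        obtain ⟨hd, hw⟩ := List.cons_prefix_cons.mp hpre
        have hw' : w <+: t :=
          lower_prefix (hvne q (by simp)) (hvup q (by simp)) t w
            (by
              intro ch hch
              have := hlow p (by simp [hp]) ch (by simp [hp1, hch])
              exact this) hw
        exact hnp p (by simp [hp]) (by rw [hp1, hd]; exact List.cons_prefix_cons.mpr ⟨rfl, hw'⟩)
    calc pipeA (q :: ps) (c :: t)
        = pipeA ps (rep q.1 q.2 (c :: t)) := rfl
      _ = pipeA ps (c :: rep q.1 q.2 t) := by rw [rep_cons_neg q.2 hq]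
      _ = c :: pipeA ps (rep q.1 q.2 t) :=
          ih (fun p hp => hk p (by simp [hp])) (fun p hp => hlow p (by simp [hp]))
             (fun p hp => hvne p (by simp [hp])) (fun p hp => hvup p (by simp [hp]))
             (rep q.1 q.2 t) hrest
      _ = c :: pipeA (q :: ps) t := rfl

-- the first-matching key is consumed by exactly its own stage of the pipeline
theorem pipeA_match {ps ps₁ ps₂ : List (List Char × List Char)}
    {p : List Char × List Char}
    (hdec : ps = ps₁ ++ p :: ps₂)
    (hk : ∀ q ∈ ps, q.1 ≠ [])
    (hnd : (ps.map (·.1)).Nodup)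
    (h6 : ∀ q ∈ ps, ∀ r ∈ ps, q.1 ≠ r.1 → SplitSafe q.1 r.1)
    (h7 : ∀ q ∈ ps, ∀ r ∈ ps, SplitSafe q.1 r.2)
    (x : List Char) :
    pipeA ps (p.1 ++ x) = p.2 ++ pipeA ps x := by
  subst hdec
  have hpmem : p ∈ ps₁ ++ p :: ps₂ := by simp
  have hne : ∀ q ∈ ps₁, q.1 ≠ p.1 := by
    intro q hq
    have : (ps₁.map (·.1) ++ p.1 :: ps₂.map (·.1)).Nodup := by simpa using hnd
    have hdisj := (List.nodup_append.mp this).2.2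
    exact fun h => hdisj q.1 (List.mem_map_of_mem hq) p.1 (by simp) h
  have h1 : ∀ q ∈ ps₁, SplitSafe q.1 p.1 := fun q hq =>
    h6 q (by simp [hq]) p hpmem (hne q hq)
  have h2 : ∀ q ∈ ps₂, SplitSafe q.1 p.2 := fun q hq =>
    h7 q (by simp [hq]) p hpmem
  calc pipeA (ps₁ ++ p :: ps₂) (p.1 ++ x)
      = pipeA ps₂ (rep p.1 p.2 (pipeA ps₁ (p.1 ++ x))) := by
        simp [pipeA, List.foldl_append]
    _ = pipeA ps₂ (rep p.1 p.2 (p.1 ++ pipeA ps₁ x)) := by rw [pipeA_append h1]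
    _ = pipeA ps₂ (p.2 ++ rep p.1 p.2 (pipeA ps₁ x)) := by
        rw [rep_head p.2 (hk p hpmem)]
    _ = p.2 ++ pipeA ps₂ (rep p.1 p.2 (pipeA ps₁ x)) := pipeA_append h2 _
    _ = p.2 ++ pipeA (ps₁ ++ p :: ps₂) x := by simp [pipeA, List.foldl_append]

-- the 19 sequential replace passes equal the single scan, for any table with the
-- shape properties proved below about the literal table
theorem pipe_eq_scan {ps : List (List Char × List Char)}
    (hk : ∀ p ∈ ps, p.1 ≠ [])
    (hlow : ∀ p ∈ ps, ∀ c ∈ p.1.tail, isLowC c = true)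
    (hvne : ∀ p ∈ ps, p.2 ≠ [])
    (hvup : ∀ p ∈ ps, ∀ c ∈ p.2.take 1, isLowC c = false)
    (hnd : (ps.map (·.1)).Nodup)
    (h6 : ∀ q ∈ ps, ∀ r ∈ ps, q.1 ≠ r.1 → SplitSafe q.1 r.1)
    (h7 : ∀ q ∈ ps, ∀ r ∈ ps, SplitSafe q.1 r.2) :
    ∀ l, pipeA ps l = scanTrad ps l := by
  have key : ∀ n l, l.length ≤ n → pipeA ps l = scanTrad ps l := by
    intro n
    induction n with
    | zero =>
      intro l hl
      have : l = [] := List.length_eq_zero_iff.mp (Nat.le_zero.mp hl)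
      subst this
      rw [pipeA_nil, scanTrad]
    | succ n ih =>
      intro l hl
      match l with
      | [] => rw [pipeA_nil, scanTrad]
      | c :: t =>
        cases hfind : List.find? (fun p => p.1.isPrefixOf (c :: t)) ps with
        | none =>
          have hnp : ∀ p ∈ ps, ¬ p.1 <+: c :: t := by
            intro p hp hpre
            have := List.find?_eq_none.mp hfind p hp
            simp [List.isPrefixOf_iff_prefix] at this
            exact this hpre
          rw [scanTrad, hfind, pipeA_cons hk hlow hvne hvup c t hnp,
            ih t (by simpa using Nat.lt_succ_iff.mp (by simpa using hl))]
        | some p =>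
          obtain ⟨hpp, ps₁, ps₂, hdec, -⟩ := List.find?_eq_some_iff_append.mp hfind
          have hpre : p.1 <+: c :: t := List.isPrefixOf_iff_prefix.mp hpp
          obtain ⟨x, hx⟩ := hpre
          have hxd : x = t.drop (p.1.length - 1) := by
            match hp1 : p.1, hk p (by rw [hdec]; simp) with
            | d :: k', _ =>
              rw [hp1] at hx
              have hkx : k' ++ x = t := by
                simpa using congrArg List.tail hx
              rw [← hkx]
              simp
          have hxt : x.length ≤ n := by
            have : x.length ≤ t.length := by rw [hxd]; simp
            have ht : t.length ≤ n := by simpa using Nat.lt_succ_iff.mp (by simpa using hl)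
            omega
          calc pipeA ps (c :: t)
              = pipeA ps (p.1 ++ x) := by rw [hx]
            _ = p.2 ++ pipeA ps x := pipeA_match hdec hk hnd h6 h7 x
            _ = p.2 ++ scanTrad ps x := by rw [ih x hxt]
            _ = scanTrad ps (c :: t) := by rw [scanTrad, hfind]; simp [hxd]
  exact fun l => key l.length l le_rfl

-- rep is exactly PySem's replace for a nonempty needle
theorem go_eq_rep {old new : List Char} (h : old ≠ []) :
    ∀ fuel l acc, l.length ≤ fuel →
      PySem.Chars.replace.go old new fuel l acc = acc.reverse ++ rep old new l := by
  intro fuel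
  induction fuel with
  | zero =>
    intro l acc hl
    have : l = [] := List.length_eq_zero_iff.mp (Nat.le_zero.mp hl)
    subst this
    simp [PySem.Chars.replace.go, rep_nil]
  | succ n ih =>
    intro l acc hl
    match l with
    | [] => simp [PySem.Chars.replace.go, rep_nil]
    | c :: t =>
      rw [PySem.Chars.replace.go]
      split
      · next hpre =>
        have hp : old <+: c :: t := List.isPrefixOf_iff_prefix.mp hpre
        have hlen : old.length ≥ 1 := by
          cases old with
          | nil => exact absurd rfl h
          | cons _ _ => simp
        have hdrop : (c :: t).drop old.length = t.drop (old.length - 1) := by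
          match old, hlen with
          | d :: o', _ => simp
        have hl' : t.length + 1 ≤ n + 1 := by simpa using hl
        rw [ih _ _ (show (List.drop old.length (c :: t)).length ≤ n by
          simp only [List.length_drop, List.length_cons]; omega)]
        rw [rep_cons_pos new hp, hdrop]
        simp
      · next hpre =>
        have hp : ¬ old <+: c :: t := fun hh => hpre (List.isPrefixOf_iff_prefix.mpr hh)
        rw [ih _ _ (by simpa using Nat.lt_succ_iff.mp (by simpa using hl))]
        rw [rep_cons_neg new hp]
        simp

theorem replace_eq_rep {old : List Char} (new : List Char) (h : old ≠ []) (l : List Char) :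
    PySem.Chars.replace l old new = rep old new l := by
  rw [PySem.Chars.replace]
  have : old.isEmpty = false := by cases old with | nil => exact absurd rfl h | cons _ _ => rfl
  rw [this]
  simpa using go_eq_rep h l.length l [] le_rfl

-- bridge: A's String-level foldl, on code points
theorem foldl_replace_toList (qs : List (String × String)) (s : String) :
    (qs.foldl (fun d p => PySem.Str.replace d p.1 p.2) s).toList =
      (qs.map (fun p => (p.1.toList, p.2.toList))).foldl
        (fun l p => PySem.Chars.replace l p.1 p.2) s.toList := by
  induction qs generalizing s with
  | nil => rfl
  | cons q qs ih =>
    simpa [PySem.Str.toList_replace] using ih (PySem.Str.replace s q.1 q.2)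

theorem foldl_replace_eq_pipeA (qs : List (List Char × List Char))
    (hk : ∀ p ∈ qs, p.1 ≠ []) (l : List Char) :
    qs.foldl (fun s p => PySem.Chars.replace s p.1 p.2) l = pipeA qs l := by
  induction qs generalizing l with
  | nil => rfl
  | cons q qs ih =>
    calc (q :: qs).foldl (fun s p => PySem.Chars.replace s p.1 p.2) l
        = qs.foldl (fun s p => PySem.Chars.replace s p.1 p.2)
            (PySem.Chars.replace l q.1 q.2) := rfl
      _ = qs.foldl (fun s p => PySem.Chars.replace s p.1 p.2) (rep q.1 q.2 l) := by
          rw [replace_eq_rep q.2 (hk q (by simp)) l]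
      _ = pipeA qs (rep q.1 q.2 l) := ih (fun p hp => hk p (by simp [hp])) _
      _ = pipeA (q :: qs) l := rfl

-- the decidable shape facts about the literal table
set_option maxRecDepth 10000
theorem tableA_eq : traducoes.map (fun p => (p.1.toList, p.2.toList)) = traducoesAlt := by decide

theorem facts_k : ∀ p ∈ traducoesAlt, p.1 ≠ [] := by decide
theorem facts_low : ∀ p ∈ traducoesAlt, ∀ c ∈ p.1.tail, isLowC c = true := by
  have h : traducoesAlt.all (fun p => p.1.tail.all isLowC) = true := by decide
  simp only [List.all_eq_true] at h
  exact h
theorem facts_vne : ∀ p ∈ traducoesAlt, p.2 ≠ [] := by decide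
theorem facts_vup : ∀ p ∈ traducoesAlt, ∀ c ∈ p.2.take 1, isLowC c = false := by
  have h : traducoesAlt.all (fun p => (p.2.take 1).all (fun c => !isLowC c)) = true := by decide
  simp only [List.all_eq_true, Bool.not_eq_true'] at h
  exact h
theorem facts_nd : (traducoesAlt.map (·.1)).Nodup := by decide
theorem facts_6 : ∀ q ∈ traducoesAlt, ∀ r ∈ traducoesAlt, q.1 ≠ r.1 → SplitSafe q.1 r.1 := by
  decide
theorem facts_7 : ∀ q ∈ traducoesAlt, ∀ r ∈ traducoesAlt, SplitSafe q.1 r.2 := by decide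

-- ===== VERDICT (by name: the statement is the Claim_ definition above) =====
theorem traduzir_data_spec : Claim_equal_traduzir_data := by
  intro data _
  show traduzir_data data = traduzir_data_alt data
  apply String.toList_inj.mp
  calc (traduzir_data data).toList
      = traducoesAlt.foldl (fun l p => PySem.Chars.replace l p.1 p.2) data.toList := by
        rw [traduzir_data, foldl_replace_toList, tableA_eq]
    _ = pipeA traducoesAlt data.toList := foldl_replace_eq_pipeA _ facts_k _
    _ = scanTrad traducoesAlt data.toList :=
        pipe_eq_scan facts_k facts_low facts_vne facts_vup facts_nd facts_6 facts_7 _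
    _ = (traduzir_data_alt data).toList := by
        rw [traduzir_data_alt]; simp
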